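-- pv_equiv track=rewrite | github.com/GRONGHU/Condensate | Analysis scripts/FirstPassage/First_Passage_Time.py | find_dwell_times_out
-- ===== SOURCE A (Python) =====
-- def find_dwell_times_out(seq):
--     """Calculate residence time outside the channel"""
--     events = []
--     in_event = False
--     start_index = -1
--
--     for i in range(len(seq)):
--         if seq[i] == 1:  # Enter event
--             if not in_event:
--                 in_event = True
--                 start_index = i
--         elif seq[i] == 2:  # Exit event
--             if in_event:
--                 end_index = i
--                 length = end_index - start_index + 1
--                 events.append(length)
--                 in_event = False
--         else:  # seq[i] == 0
--             pass
--     return events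
-- ===== SOURCE B (Python) =====
-- def find_dwell_times_out(seq):
--     """Calculate residence time outside the channel"""
--     enters = [i for i, x in enumerate(seq) if x == 1]
--     exits = [i for i, x in enumerate(seq) if x == 2]
--     out = []
--     oi = 0
--     xi = 0
--     while oi < len(enters):
--         s = enters[oi]
--         while xi < len(exits) and exits[xi] <= s:
--             xi += 1
--         if xi == len(exits):
--             break
--         e = exits[xi]
--         xi += 1
--         out.append(e - s + 1)
--         while oi < len(enters) and enters[oi] <= e:
--             oi += 1
--     return out
-- ===== Notes on version B (the rewrite author's own statement) =====
-- stated objective: alternative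
-- what changed: Replaces the element-wise boolean state machine by first building the index tables of enter (==1) and exit (==2) positions and then pairing them with a two-pointer walk that skips exits at or before each start and enters at or before each matched exit.
import Mathlib
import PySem

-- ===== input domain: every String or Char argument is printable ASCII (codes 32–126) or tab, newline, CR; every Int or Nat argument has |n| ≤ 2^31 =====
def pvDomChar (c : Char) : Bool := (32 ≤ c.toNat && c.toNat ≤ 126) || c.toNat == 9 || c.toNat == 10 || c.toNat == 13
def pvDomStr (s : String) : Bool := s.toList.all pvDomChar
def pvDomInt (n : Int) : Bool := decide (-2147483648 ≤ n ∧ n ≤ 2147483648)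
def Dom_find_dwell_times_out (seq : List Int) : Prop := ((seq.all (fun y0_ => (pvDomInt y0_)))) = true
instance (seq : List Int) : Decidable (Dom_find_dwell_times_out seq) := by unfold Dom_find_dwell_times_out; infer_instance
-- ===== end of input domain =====

-- B replaces A's element-wise boolean state machine by index tables of the enter/exit
-- positions paired up by a two-pointer walk; same O(n) cost, different decomposition.

-- ===== PORT A =====
-- loop body of A's `for i in range(len(seq))`; state = (events, in_event, start_index)
def pvStepA (st : List Int × Bool × Int) (p : Int × Int) : List Int × Bool × Int :=
  if p.2 = 1 then
    (if !st.2.1 then (st.1, true, p.1) else st)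
  else if p.2 = 2 then
    (if st.2.1 then (st.1 ++ [p.1 - st.2.2 + 1], false, st.2.2) else st)
  else st

-- `for i in range(len(seq))` with `seq[i]` iterated as the in-range (i, seq[i]) pairs
def find_dwell_times_out (seq : List Int) : List Int :=
  ((PySem.List.enumerate seq 0).foldl pvStepA ([], false, -1)).1

-- ===== PORT B =====
-- termination helper for pvWalk (cited in decreasing_by)
theorem pvDropWhile_head_false {p : Int → Bool} :
    ∀ (l : List Int) (e : Int) (tl : List Int), l.dropWhile p = e :: tl → p e = false := by
  intro l; induction l with
  | nil => intro e tl h; simp [List.dropWhile] at h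
  | cons a t ih =>
    intro e tl h
    by_cases hp : p a = true
    · rw [List.dropWhile_cons, if_pos hp] at h; exact ih e tl h
    · rw [List.dropWhile_cons, if_neg hp] at h
      injection h with h1 _
      subst h1
      simpa using hp

-- the inner `while … and … <= s/e: pointer += 1` loops are pointer advances over the
-- sorted index tables: ported as dropWhile on the remaining suffix (exact)
def pvWalk (enters exits : List Int) : List Int :=
  match enters with
  | [] => []
  | s :: rest =>
    match h : exits.dropWhile (fun x => decide (x ≤ s)) with
    | [] => []
    | e :: exits' =>
      (e - s + 1) :: pvWalk ((s :: rest).dropWhile (fun x => decide (x ≤ e))) exits'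
termination_by enters.length
decreasing_by
  have he : s < e := by
    have := pvDropWhile_head_false (p := fun x => decide (x ≤ s)) exits e exits' h
    simpa using this
  have : (s :: rest).dropWhile (fun x => decide (x ≤ e)) = rest.dropWhile (fun x => decide (x ≤ e)) := by
    simp [List.dropWhile, le_of_lt he]
  simp only [this, List.length_cons]
  exact Nat.lt_succ_of_le (List.length_dropWhile_le _ _)

-- `[i for i, x in enumerate(seq) if x == v]` comprehensions, then the walk
def find_dwell_times_out_alt (seq : List Int) : List Int :=
  pvWalk
    ((PySem.List.enumerate seq 0).filterMap (fun p => if p.2 = 1 then some p.1 else none))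
    ((PySem.List.enumerate seq 0).filterMap (fun p => if p.2 = 2 then some p.1 else none))

-- ===== PRECONDITION & SPEC =====
def Spec_find_dwell_times_out (seq : List Int) (out : List Int) : Prop := out = find_dwell_times_out_alt seq
instance (seq : List Int) (out : List Int) : Decidable (Spec_find_dwell_times_out seq out) := by unfold Spec_find_dwell_times_out; infer_instance

-- ===== CLAIM (what is proved, stated in full; the proofs are below) =====
def Claim_equal_find_dwell_times_out : Prop := ∀ (seq : List Int), Dom_find_dwell_times_out seq → Spec_find_dwell_times_out seq (find_dwell_times_out seq)

-- ===== LEMMAS AND PROOFS =====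

-- index table of value v in seq, indices starting at k
def pvIdx (v : Int) (seq : List Int) (k : Int) : List Int :=
  (PySem.List.enumerate seq k).filterMap (fun p => if p.2 = v then some p.1 else none)

-- continuation of the walk while inside an event that started at s
def pvWalkIn (s : Int) (enters exits : List Int) : List Int :=
  match exits with
  | [] => []
  | e :: exits' => (e - s + 1) :: pvWalk (enters.dropWhile (fun x => decide (x ≤ e))) exits'

theorem pvIdx_nil (v : Int) (k : Int) : pvIdx v [] k = [] := rfl

theorem pvIdx_cons (v x : Int) (t : List Int) (k : Int) :
    pvIdx v (x :: t) k = (if x = v then [k] else []) ++ pvIdx v t (k + 1) := by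
  by_cases h : x = v
  · simp [pvIdx, PySem.List.enumerate_cons, h]
  · simp [pvIdx, PySem.List.enumerate_cons, h]

theorem pvIdx_lb : ∀ (t : List Int) (v k i : Int), i ∈ pvIdx v t k → k ≤ i := by
  intro t; induction t with
  | nil => intro v k i h; simp [pvIdx_nil] at h
  | cons a t ih =>
    intro v k i h
    rw [pvIdx_cons] at h
    rcases List.mem_append.1 h with h | h
    · split at h <;> simp at h; omega
    · have := ih v (k + 1) i h; omega

theorem pvDropWhile_gt {k : Int} : ∀ (l : List Int), (∀ x ∈ l, k < x) →
    l.dropWhile (fun x => decide (x ≤ k)) = l := by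
  intro l hl
  cases l with
  | nil => rfl
  | cons a t =>
    have ha : ¬ (a ≤ k) := not_le.2 (hl a (by simp))
    simp [ha]

-- pvWalk unfolding equations
theorem pvWalk_nil (exits : List Int) : pvWalk [] exits = [] := by rw [pvWalk]

theorem pvWalk_cons_nil (s : Int) (rest exits : List Int)
    (h : exits.dropWhile (fun x => decide (x ≤ s)) = []) :
    pvWalk (s :: rest) exits = [] := by
  rw [pvWalk.eq_def]
  split
  · rfl
  · rename_i s' rest' heq
    injection heq with hs hr
    subst hs; subst hr
    split
    · rfl
    · rename_i e X2 heq2; rw [h] at heq2; cases heq2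

theorem pvWalk_cons_cons (s : Int) (rest exits : List Int) (e : Int) (exits' : List Int)
    (h : exits.dropWhile (fun x => decide (x ≤ s)) = e :: exits') :
    pvWalk (s :: rest) exits
      = (e - s + 1) :: pvWalk ((s :: rest).dropWhile (fun x => decide (x ≤ e))) exits' := by
  rw [pvWalk.eq_def]
  split
  · rename_i heq; cases heq
  · rename_i s' rest' heq
    injection heq with hs hr
    subst hs; subst hr
    split
    · rename_i heq2; rw [h] at heq2; cases heq2
    · rename_i e2 X2 heq2
      rw [h] at heq2
      injection heq2 with h1 h2
      subst h1; subst h2; rfl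

-- skipping an enter index below every exit of the current suffix
theorem pvWalkIn_skip (s k : Int) (E X : List Int) (hX : ∀ x ∈ X, k < x) :
    pvWalkIn s (k :: E) X = pvWalkIn s E X := by
  cases X with
  | nil => rfl
  | cons e X' =>
    have hke : k ≤ e := le_of_lt (hX e (by simp))
    simp [pvWalkIn, hke]

-- skipping an exit index below every enter of the current suffix
theorem pvWalk_skip (k : Int) (E X : List Int) (hE : ∀ x ∈ E, k < x) :
    pvWalk E (k :: X) = pvWalk E X := by
  cases E with
  | nil => simp [pvWalk_nil]
  | cons s rest =>
    have hks : k ≤ s := le_of_lt (hE s (by simp))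
    have hdw : (k :: X).dropWhile (fun x => decide (x ≤ s))
        = X.dropWhile (fun x => decide (x ≤ s)) := by
      simp [hks]
    cases h : X.dropWhile (fun x => decide (x ≤ s)) with
    | nil => rw [pvWalk_cons_nil _ _ _ (hdw.trans h), pvWalk_cons_nil _ _ _ h]
    | cons e X' => rw [pvWalk_cons_cons _ _ _ _ _ (hdw.trans h), pvWalk_cons_cons _ _ _ _ _ h]

-- opening a fresh event at index k, all later indices being > k
theorem pvWalk_open (k : Int) (E X : List Int) (hX : ∀ x ∈ X, k < x) :
    pvWalk (k :: E) X = pvWalkIn k E X := by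
  cases hdw : X.dropWhile (fun x => decide (x ≤ k)) with
  | nil =>
    rw [pvWalk_cons_nil _ _ _ hdw]
    rw [pvDropWhile_gt X hX] at hdw
    simp [hdw, pvWalkIn]
  | cons e X' =>
    rw [pvWalk_cons_cons _ _ _ _ _ hdw]
    rw [pvDropWhile_gt X hX] at hdw
    subst hdw
    have hke : k ≤ e := le_of_lt (hX e (by simp))
    simp [pvWalkIn, hke]

-- the main invariant: A's fold from either state equals the pending part of B's walk
theorem pvMain : ∀ (l : List Int) (k : Int),
    (∀ (acc : List Int) (d : Int),
      ((PySem.List.enumerate l k).foldl pvStepA (acc, false, d)).1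
        = acc ++ pvWalk (pvIdx 1 l k) (pvIdx 2 l k)) ∧
    (∀ (acc : List Int) (s : Int),
      ((PySem.List.enumerate l k).foldl pvStepA (acc, true, s)).1
        = acc ++ pvWalkIn s (pvIdx 1 l k) (pvIdx 2 l k)) := by
  intro l
  induction l with
  | nil =>
    intro k
    constructor <;> intro acc d <;>
      simp [PySem.List.enumerate_nil, pvIdx_nil, pvWalk_nil, pvWalkIn]
  | cons x t ih =>
    intro k
    have ih1 := (ih (k + 1)).1
    have ih2 := (ih (k + 1)).2
    have hE : ∀ y ∈ pvIdx 1 t (k + 1), k < y := fun y hy => by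
      have := pvIdx_lb t 1 (k + 1) y hy; omega
    have hX : ∀ y ∈ pvIdx 2 t (k + 1), k < y := fun y hy => by
      have := pvIdx_lb t 2 (k + 1) y hy; omega
    constructor
    · intro acc d
      rw [PySem.List.enumerate_cons, List.foldl_cons]
      by_cases h1 : x = 1
      · subst h1
        have hs : pvStepA (acc, false, d) (k, 1) = (acc, true, k) := by simp [pvStepA]
        rw [hs, ih2 acc k, pvIdx_cons, pvIdx_cons, if_pos rfl, if_neg (by norm_num)]
        simp [pvWalk_open k _ _ hX]
      · by_cases h2 : x = 2
        · subst h2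
          have hs : pvStepA (acc, false, d) (k, 2) = (acc, false, d) := by simp [pvStepA]
          rw [hs, ih1 acc d, pvIdx_cons, pvIdx_cons, if_neg (by norm_num), if_pos rfl]
          simp [pvWalk_skip k _ _ hE]
        · have hs : pvStepA (acc, false, d) (k, x) = (acc, false, d) := by
            simp [pvStepA, h1, h2]
          rw [hs, ih1 acc d, pvIdx_cons, pvIdx_cons, if_neg h1, if_neg h2]
          simp
    · intro acc s
      rw [PySem.List.enumerate_cons, List.foldl_cons]
      by_cases h1 : x = 1
      · subst h1
        have hs : pvStepA (acc, true, s) (k, 1) = (acc, true, s) := by simp [pvStepA]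
        rw [hs, ih2 acc s, pvIdx_cons, pvIdx_cons, if_pos rfl, if_neg (by norm_num)]
        simp [pvWalkIn_skip s k _ _ hX]
      · by_cases h2 : x = 2
        · subst h2
          have hs : pvStepA (acc, true, s) (k, 2) = (acc ++ [k - s + 1], false, s) := by
            simp [pvStepA]
          rw [hs, ih1 (acc ++ [k - s + 1]) s, pvIdx_cons, pvIdx_cons,
            if_neg (by norm_num), if_pos rfl]
          have hIn : pvWalkIn s (pvIdx 1 t (k + 1)) (k :: pvIdx 2 t (k + 1))
              = (k - s + 1) :: pvWalk (pvIdx 1 t (k + 1)) (pvIdx 2 t (k + 1)) := by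
            simp [pvWalkIn, pvDropWhile_gt _ hE]
          simp [hIn]
        · have hs : pvStepA (acc, true, s) (k, x) = (acc, true, s) := by
            simp [pvStepA, h1, h2]
          rw [hs, ih2 acc s, pvIdx_cons, pvIdx_cons, if_neg h1, if_neg h2]
          simp

-- ===== VERDICT (by name: the statement is the Claim_ definition above) =====
theorem find_dwell_times_out_spec : Claim_equal_find_dwell_times_out := by
  intro seq _
  show find_dwell_times_out seq = find_dwell_times_out_alt seq
  have h := (pvMain seq 0).1 [] (-1)
  simpa [find_dwell_times_out, find_dwell_times_out_alt, pvIdx] using h
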